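-- pv_equiv track=rewrite | github.com/StarsExpress/LeetCode-Repository | hash/longest_duplicate.py | find_longest_duplicate
-- ===== SOURCE A (Python) =====
-- def _detect_duplicate(
--     string: str, length: int, window_size: int, base: int = 31, mod: int = 2 ** 34 - 1
-- ):
--     powers = [1] + [0] * length  # 1st power starts from 1.
--     hash_values = set()
--
--     for i in range(1, length + 1):  # Precompute powers of base, and modulo over mod.
--         powers[i] += (powers[i - 1] * base) % mod
--
--     window_hash = 0
--     for i in range(window_size):  # Hash value of 1st window.
--         window_hash *= base
--         window_hash += ord(string[i])
--         window_hash %= mod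
--     hash_values.add(window_hash)
--
--     for i in range(1, length - window_size + 1):  # Hash values of the rest windows.
--         # Remove contribution of window's 1st char.
--         window_hash -= powers[window_size - 1] * ord(string[i - 1])
--         window_hash %= mod
--
--         window_hash *= base  # Shift window by one char and add new char to hash.
--         window_hash += ord(string[i + window_size - 1])
--         window_hash %= mod
--
--         if window_hash in hash_values:  # Duplicate detected.
--             return string[i: i + window_size]
--         hash_values.add(window_hash)
--
--     return None  # No duplicates found.
--
-- def find_longest_duplicate(string: str):  # LeetCode Q.1044.
--     longest_duplicate_substring = ""
--     string_len = len(string)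
--
--     min_window, max_window = 1, string_len - 1  # Search space.
--     while min_window <= max_window:  # Must include the case min window = max window.
--         mid_window = (min_window + max_window) // 2
--         duplicate_substring = _detect_duplicate(string, string_len, mid_window)
--         if duplicate_substring:  # Can try a bigger window.
--             longest_duplicate_substring = duplicate_substring
--             min_window = mid_window + 1
--             continue
--         max_window = mid_window - 1  # Must try a smaller window.
--
--     return longest_duplicate_substring
-- ===== SOURCE B (Python) =====
-- def find_longest_duplicate(string):  # prefix-hash tables + hash-group multimap; recursive binary search
--     n = len(string)
--     MOD = 2 ** 34 - 1
--     BASE = 31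
--     prefix = [0] * (n + 1)   # prefix[k] = polynomial hash of string[:k]
--     powers = [1] * (n + 1)   # powers[k] = BASE**k % MOD
--     for k in range(n):
--         prefix[k + 1] = (prefix[k] * BASE + ord(string[k])) % MOD
--         powers[k + 1] = (powers[k] * BASE) % MOD
--
--     def earliest_collision(w):
--         # Group all window start indices by their (closed-form) window hash, then
--         # take the smallest second occurrence over all groups: that index is the
--         # first window whose hash was already seen.
--         groups = {}
--         for i in range(n - w + 1):
--             h = (prefix[i + w] - prefix[i] * powers[w]) % MOD
--             groups.setdefault(h, []).append(i)
--         cands = [g[1] for g in groups.values() if len(g) > 1]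
--         return min(cands) if cands else None
--
--     def search(lo, hi, best):
--         if lo > hi:
--             return best
--         mid = (lo + hi) // 2
--         i = earliest_collision(mid)
--         if i is not None:
--             return search(mid + 1, hi, string[i:i + mid])
--         return search(lo, mid - 1, best)
--
--     return search(1, n - 1, "")
-- ===== Notes on version B (the rewrite author's own statement) =====
-- stated objective: alternative
-- what changed: B precomputes prefix-hash and power tables once and, per binary-search probe, groups all window start indices by their closed-form window hash in a multimap and returns the minimum second-occurrence index, instead of A's per-probe powers rebuild, rolling-hash updates and early-exit seen-set scan; the binary search is recursive and slices the string itself from the returned index.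
import Mathlib
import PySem

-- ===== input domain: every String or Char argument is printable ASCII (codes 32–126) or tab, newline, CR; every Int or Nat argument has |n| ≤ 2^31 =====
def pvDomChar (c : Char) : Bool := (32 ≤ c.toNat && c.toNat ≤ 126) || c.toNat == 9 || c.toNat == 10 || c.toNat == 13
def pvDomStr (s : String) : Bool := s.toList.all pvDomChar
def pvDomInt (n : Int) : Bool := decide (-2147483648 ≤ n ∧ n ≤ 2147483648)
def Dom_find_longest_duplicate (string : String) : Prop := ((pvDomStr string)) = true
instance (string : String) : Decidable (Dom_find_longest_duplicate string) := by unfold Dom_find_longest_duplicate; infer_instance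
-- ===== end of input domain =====

-- B builds prefix-hash/powers tables once and, per probe, groups window starts by closed-form
-- hash in a multimap, returning the minimum second-occurrence index (objective: alternative).


-- mod = 2**34 - 1, base = 31 (the defaults A always uses)
def pvM : Int := 17179869183

-- ord(string[i]); every index used by either program is in range, so getD's default is never read
def pvCode (l : List Char) (i : Nat) : Int := ((l.getD i ' ').toNat : Int)

-- ===== PORT A =====
-- A's `powers` table: entry i depends only on entry i-1, ported as the same recurrence
def pvPowA : Nat → Int
  | 0 => 1
  | i + 1 => (pvPowA i * 31) % pvM

-- the loop "for i in range(1, length - window_size + 1)" with early return on a seen hash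
def pvLoopA (l : List Char) (w : Nat) : List Nat → Int → PySem.Set Int → Option String
  | [], _, _ => none
  | i :: rest, h, seen =>
    let h1 := (h - pvPowA (w - 1) * pvCode l (i - 1)) % pvM
    let h2 := (h1 * 31 + pvCode l (i + w - 1)) % pvM
    if PySem.Set.contains seen h2 then some (String.ofList ((l.drop i).take w))  -- string[i:i+w], 0 ≤ i, i+w ≤ len: exact
    else pvLoopA l w rest h2 (PySem.Set.add seen h2)

def pvDetectA (l : List Char) (length w : Nat) : Option String :=
  let h0 := (List.range w).foldl (fun h i => (h * 31 + pvCode l i) % pvM) 0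
  pvLoopA l w (List.range' 1 (length - w)) h0 (PySem.Set.add PySem.Set.empty h0)

def pvBsearchA (l : List Char) (n : Nat) (lo hi : Int) (best : String) : String :=
  if h : lo ≤ hi then
    let mid := PySem.Int.floordiv (lo + hi) 2
    have hlo : lo ≤ mid := by
      show lo ≤ PySem.Int.floordiv (lo + hi) 2
      rw [PySem.Int.floordiv_eq_ediv_of_pos (by omega)]; omega
    have hhi : mid ≤ hi := by
      show PySem.Int.floordiv (lo + hi) 2 ≤ hi
      rw [PySem.Int.floordiv_eq_ediv_of_pos (by omega)]; omega
    match pvDetectA l n mid.toNat with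
    | some d => pvBsearchA l n (mid + 1) hi d      -- substring found is nonempty, hence truthy
    | none => pvBsearchA l n lo (mid - 1) best
  else best
termination_by (hi + 1 - lo).toNat
decreasing_by all_goals omega

def find_longest_duplicate (string : String) : String :=
  let l := string.toList
  pvBsearchA l l.length 1 ((l.length : Int) - 1) ""

-- ===== PORT B =====
-- Source B's single table-building loop: prefix[k] and powers[k], entrywise the same recurrences
def pvPrefB (l : List Char) : Nat → Int
  | 0 => 0
  | k + 1 => (pvPrefB l k * 31 + pvCode l k) % pvM

def pvPowB : Nat → Int
  | 0 => 1
  | k + 1 => (pvPowB k * 31) % pvM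

-- the closed-form window hash h of Source B's grouping loop
def pvHashB (l : List Char) (w i : Nat) : Int :=
  (pvPrefB l (i + w) - pvPrefB l i * pvPowB w) % pvM

-- "for i in range(n-w+1): groups.setdefault(h, []).append(i)"
def pvGroupsB (l : List Char) (w m : Nat) : PySem.Dict Int (List Nat) :=
  (List.range m).foldl (fun d i => d.modify (pvHashB l w i) [] (· ++ [i])) PySem.Dict.empty

-- "[g[1] for g in groups.values() if len(g) > 1]" then "min(cands) if cands else None"
def pvEarliestB (l : List Char) (w m : Nat) : Option Nat :=
  let cands := (PySem.Dict.values (pvGroupsB l w m)).filterMap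
    (fun g => if 1 < g.length then g[1]? else none)
  PySem.List.min? cands (fun x => x)

-- Source B's recursive binary search; slices string[i:i+mid] itself (0 ≤ i, i+mid ≤ len: exact)
def pvSearchB (l : List Char) (n : Nat) (lo hi : Int) (best : String) : String :=
  if h : lo ≤ hi then
    let mid := PySem.Int.floordiv (lo + hi) 2
    have hlo : lo ≤ mid := by
      show lo ≤ PySem.Int.floordiv (lo + hi) 2
      rw [PySem.Int.floordiv_eq_ediv_of_pos (by omega)]; omega
    have hhi : mid ≤ hi := by
      show PySem.Int.floordiv (lo + hi) 2 ≤ hi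
      rw [PySem.Int.floordiv_eq_ediv_of_pos (by omega)]; omega
    match pvEarliestB l mid.toNat (n - mid.toNat + 1) with
    | some i => pvSearchB l n (mid + 1) hi (String.ofList ((l.drop i).take mid.toNat))
    | none => pvSearchB l n lo (mid - 1) best
  else best
termination_by (hi + 1 - lo).toNat
decreasing_by all_goals omega

def find_longest_duplicate_alt (string : String) : String :=
  let l := string.toList
  pvSearchB l l.length 1 ((l.length : Int) - 1) ""

-- ===== PRECONDITION & SPEC =====
def Spec_find_longest_duplicate (string : String) (out : String) : Prop := out = find_longest_duplicate_alt string
instance (string : String) (out : String) : Decidable (Spec_find_longest_duplicate string out) := by unfold Spec_find_longest_duplicate; infer_instance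

-- ===== CLAIM (what is proved, stated in full; the proofs are below) =====
def Claim_equal_find_longest_duplicate : Prop := ∀ (string : String), Dom_find_longest_duplicate string → Spec_find_longest_duplicate string (find_longest_duplicate string)

-- ===== LEMMAS AND PROOFS =====

-- reduced (per-step mod) and raw polynomial hash folds
def pvPoly (h : Int) (xs : List Char) : Int := xs.foldl (fun h c => (h * 31 + (c.toNat : Int)) % pvM) h
def pvRaw (h : Int) (xs : List Char) : Int := xs.foldl (fun h c => h * 31 + (c.toNat : Int)) h

-- hash of window of width w starting at i
def pvWH (l : List Char) (i w : Nat) : Int := pvPoly 0 ((l.drop i).take w)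

-- "index i's window hash was seen at an earlier index"
def pvDupF (f : Nat → Int) (i : Nat) : Bool := (List.range i).any (fun j => f j == f i)

-- first index in the list whose window hash was seen earlier (the common reference point)
def pvLDF (f : Nat → Int) : List Nat → Option Nat
  | [] => none
  | i :: rest => if pvDupF f i then some i else pvLDF f rest

lemma pvPoly_snoc (h : Int) (xs : List Char) (c : Char) :
    pvPoly h (xs ++ [c]) = (pvPoly h xs * 31 + (c.toNat : Int)) % pvM := by
  simp [pvPoly]

lemma pvRaw_split (xs : List Char) : ∀ h : Int, pvRaw h xs = h * 31 ^ xs.length + pvRaw 0 xs := by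
  induction xs with
  | nil => intro h; simp [pvRaw]
  | cons c t ih =>
    intro h
    show pvRaw (h * 31 + (c.toNat : Int)) t = _
    rw [ih (h * 31 + (c.toNat : Int))]
    have h2 : pvRaw 0 (c :: t) = pvRaw ((c.toNat : Int)) t := by simp [pvRaw]
    rw [h2, ih ((c.toNat : Int))]
    simp [List.length_cons]; ring

lemma pvModEq_emod (a : Int) : Int.ModEq pvM (a % pvM) a := Int.emod_emod_of_dvd a dvd_rfl

lemma pvPoly_modeq (xs : List Char) : ∀ h : Int, pvPoly h xs % pvM = pvRaw h xs % pvM := by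
  induction xs with
  | nil => intro h; rfl
  | cons c t ih =>
    intro h
    show pvPoly ((h * 31 + (c.toNat : Int)) % pvM) t % pvM = pvRaw (h * 31 + (c.toNat : Int)) t % pvM
    rw [ih ((h * 31 + (c.toNat : Int)) % pvM)]
    rw [pvRaw_split t ((h * 31 + (c.toNat : Int)) % pvM), pvRaw_split t (h * 31 + (c.toNat : Int))]
    exact ((pvModEq_emod (h * 31 + (c.toNat : Int))).mul_right _).add_right _

lemma pvPoly_reduced : ∀ (xs : List Char) (h : Int), xs ≠ [] → pvPoly h xs % pvM = pvPoly h xs := by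
  intro xs
  induction xs with
  | nil => intro h hne; exact absurd rfl hne
  | cons c t ih =>
    intro h _
    show pvPoly ((h * 31 + (c.toNat : Int)) % pvM) t % pvM = pvPoly ((h * 31 + (c.toNat : Int)) % pvM) t
    cases t with
    | nil => exact Int.emod_emod_of_dvd _ dvd_rfl
    | cons c' t' => exact ih _ (by simp)

lemma pvPow_mod : ∀ k : Nat, pvPowA k = 31 ^ k % pvM := by
  intro k
  induction k with
  | zero => rfl
  | succ k ih =>
    show (pvPowA k * 31) % pvM = 31 ^ (k + 1) % pvM
    rw [ih, pow_succ]
    exact ((pvModEq_emod (31 ^ k)).mul_right 31)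

lemma pvPowB_eq : ∀ k : Nat, pvPowB k = pvPowA k := by
  intro k
  induction k with
  | zero => rfl
  | succ k ih => show (pvPowB k * 31) % pvM = (pvPowA k * 31) % pvM; rw [ih]

-- the foldl over range w computing A's first-window hash is pvPoly over the prefix
lemma pvFoldRange (l : List Char) : ∀ (k : Nat) (h : Int), k ≤ l.length →
    (List.range k).foldl (fun h i => (h * 31 + pvCode l i) % pvM) h = pvPoly h (l.take k) := by
  intro k
  induction k with
  | zero => intro h _; rfl
  | succ k ih =>
    intro h hk
    have hlt : k < l.length := hk
    have htake : l.take (k + 1) = l.take k ++ [l[k]] := by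
      rw [List.take_add_one]; simp [List.getElem?_eq_getElem hlt]
    rw [List.range_succ, List.foldl_append, ih h (by omega), htake, pvPoly_snoc]
    simp [pvCode, List.getD, List.getElem?_eq_getElem hlt]

-- B's prefix table is pvPoly over the prefix
lemma pvPrefB_eq (l : List Char) : ∀ k : Nat, k ≤ l.length → pvPrefB l k = pvPoly 0 (l.take k) := by
  intro k
  induction k with
  | zero => intro _; rfl
  | succ k ih =>
    intro hk
    have hlt : k < l.length := hk
    have htake : l.take (k + 1) = l.take k ++ [l[k]] := by
      rw [List.take_add_one]; simp [List.getElem?_eq_getElem hlt]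
    show (pvPrefB l k * 31 + pvCode l k) % pvM = _
    rw [htake, pvPoly_snoc, ih (by omega)]
    simp [pvCode, List.getD, List.getElem?_eq_getElem hlt]

-- window split: window at i of width w (i + w ≤ n, 1 ≤ w) is mid ++ [last], window at i-1 is first :: mid
lemma pvWin_cons (l : List Char) (i w : Nat) (hi : i < l.length) :
    (l.drop i).take (w + 1) = l[i] :: ((l.drop (i + 1)).take w) := by
  rw [List.drop_eq_getElem_cons hi]
  rfl

lemma pvWin_snoc (l : List Char) (i w : Nat) (hw : i + w < l.length) :
    (l.drop i).take (w + 1) = ((l.drop i).take w) ++ [l[i + w]] := by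
  rw [List.take_add_one]
  have h1 : (l.drop i)[w]? = some l[i + w] := by
    rw [List.getElem?_drop]
    exact List.getElem?_eq_getElem hw
  simp [h1]

-- rolling update correctness: A's loop body turns the hash of window i-1 into the hash of window i
lemma pvRoll (l : List Char) (i w : Nat) (hi : 1 ≤ i) (hw : 1 ≤ w) (hn : i + w ≤ l.length) :
    ((pvWH l (i - 1) w - pvPowA (w - 1) * pvCode l (i - 1)) % pvM * 31 + pvCode l (i + w - 1)) % pvM
      = pvWH l i w := by
  obtain ⟨i', rfl⟩ : ∃ i', i = i' + 1 := ⟨i - 1, by omega⟩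
  obtain ⟨w', rfl⟩ : ∃ w', w = w' + 1 := ⟨w - 1, by omega⟩
  have hi' : i' < l.length := by omega
  have hlast : i' + 1 + w' < l.length := by omega
  set mid := (l.drop (i' + 1)).take w' with hmid
  have hwinprev : (l.drop i').take (w' + 1) = l[i'] :: mid := pvWin_cons l i' w' hi'
  have hwincur : (l.drop (i' + 1)).take (w' + 1) = mid ++ [l[i' + 1 + w']] := by
    have := pvWin_snoc l (i' + 1) w' (by omega)
    simpa [hmid] using this
  have hmidlen : mid.length = w' := by
    simp [hmid, List.length_take, List.length_drop]; omega
  have hcode1 : pvCode l i' = (l[i'].toNat : Int) := by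
    simp [pvCode, List.getD, List.getElem?_eq_getElem hi']
  have hcode2 : pvCode l (i' + 1 + (w' + 1) - 1) = (l[i' + 1 + w'].toNat : Int) := by
    have : i' + 1 + (w' + 1) - 1 = i' + 1 + w' := by omega
    rw [this]
    simp [pvCode, List.getD, List.getElem?_eq_getElem hlast]
  have hprev : Int.ModEq pvM (pvWH l i' (w' + 1)) ((l[i'].toNat : Int) * 31 ^ w' + pvRaw 0 mid) := by
    show Int.ModEq pvM (pvPoly 0 ((l.drop i').take (w' + 1))) _
    rw [hwinprev]
    have h1 : pvPoly 0 (l[i'] :: mid) % pvM = pvRaw 0 (l[i'] :: mid) % pvM := pvPoly_modeq _ 0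
    have h2 : pvRaw 0 (l[i'] :: mid) = pvRaw ((l[i'].toNat : Int)) mid := by simp [pvRaw]
    have h3 : pvRaw ((l[i'].toNat : Int)) mid = (l[i'].toNat : Int) * 31 ^ w' + pvRaw 0 mid := by
      rw [pvRaw_split, hmidlen]
    have hred : pvPoly 0 (l[i'] :: mid) % pvM = pvPoly 0 (l[i'] :: mid) :=
      pvPoly_reduced _ 0 (by simp)
    show pvPoly 0 (l[i'] :: mid) % pvM = _ % pvM
    rw [h1, h2, h3]
  have hpow : Int.ModEq pvM (pvPowA w') (31 ^ w') := by
    rw [pvPow_mod]; exact pvModEq_emod _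
  have hsub : Int.ModEq pvM
      ((pvWH l i' (w' + 1) - pvPowA w' * pvCode l i') % pvM)
      (pvRaw 0 mid) := by
    have h1 : Int.ModEq pvM (pvWH l i' (w' + 1) - pvPowA w' * pvCode l i')
        (((l[i'].toNat : Int) * 31 ^ w' + pvRaw 0 mid) - 31 ^ w' * (l[i'].toNat : Int)) := by
      rw [hcode1]
      exact hprev.sub (hpow.mul_right _)
    have h2 : ((l[i'].toNat : Int) * 31 ^ w' + pvRaw 0 mid) - 31 ^ w' * (l[i'].toNat : Int)
        = pvRaw 0 mid := by ring
    exact (pvModEq_emod _).trans (h2 ▸ h1)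
  have hlhs : Int.ModEq pvM
      ((pvWH l i' (w' + 1) - pvPowA w' * pvCode l i') % pvM * 31 + pvCode l (i' + 1 + (w' + 1) - 1))
      (pvRaw 0 mid * 31 + (l[i' + 1 + w'].toNat : Int)) := by
    rw [hcode2]
    exact (hsub.mul_right 31).add_right _
  have hraw : pvRaw 0 mid * 31 + (l[i' + 1 + w'].toNat : Int) = pvRaw 0 (mid ++ [l[i' + 1 + w']]) := by
    simp [pvRaw]
  have hrhs : pvWH l (i' + 1) (w' + 1) % pvM = pvRaw 0 (mid ++ [l[i' + 1 + w']]) % pvM := by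
    show pvPoly 0 ((l.drop (i' + 1)).take (w' + 1)) % pvM = _
    rw [hwincur]; exact pvPoly_modeq _ 0
  have hred : pvWH l (i' + 1) (w' + 1) % pvM = pvWH l (i' + 1) (w' + 1) := by
    show pvPoly 0 ((l.drop (i' + 1)).take (w' + 1)) % pvM = pvPoly 0 ((l.drop (i' + 1)).take (w' + 1))
    rw [hwincur]; exact pvPoly_reduced (mid ++ [l[i' + 1 + w']]) 0 (by simp)
  calc ((pvWH l (i' + 1 - 1) (w' + 1) - pvPowA (w' + 1 - 1) * pvCode l (i' + 1 - 1)) % pvM * 31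
          + pvCode l (i' + 1 + (w' + 1) - 1)) % pvM
      = pvRaw 0 (mid ++ [l[i' + 1 + w']]) % pvM := by
        simp only [Nat.add_sub_cancel]
        rw [← hraw]; exact hlhs
    _ = pvWH l (i' + 1) (w' + 1) % pvM := hrhs.symm
    _ = pvWH l (i' + 1) (w' + 1) := hred

-- closed-form window hash correctness for B: pvHashB is the window hash
lemma pvClosed (l : List Char) (i w : Nat) (hw : 1 ≤ w) (hn : i + w ≤ l.length) :
    pvHashB l w i = pvWH l i w := by
  show (pvPrefB l (i + w) - pvPrefB l i * pvPowB w) % pvM = pvWH l i w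
  have hwin : l.take (i + w) = l.take i ++ ((l.drop i).take w) := by
    rw [← List.take_add]
  have hwinlen : ((l.drop i).take w).length = w := by
    simp [List.length_take, List.length_drop]; omega
  have h1 : pvPrefB l (i + w) = pvPoly (pvPrefB l i) ((l.drop i).take w) := by
    rw [pvPrefB_eq l (i + w) hn, hwin, pvPrefB_eq l i (by omega)]
    simp [pvPoly, List.foldl_append]
  have hne : (l.drop i).take w ≠ [] := by
    have : 0 < ((l.drop i).take w).length := by omega
    exact List.ne_nil_of_length_pos this
  have h2 : Int.ModEq pvM (pvPrefB l (i + w)) (pvPrefB l i * 31 ^ w + pvRaw 0 ((l.drop i).take w)) := by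
    rw [h1]
    have := pvPoly_modeq ((l.drop i).take w) (pvPrefB l i)
    rw [Int.ModEq, this, pvRaw_split _ (pvPrefB l i), hwinlen]
  have hpow : Int.ModEq pvM (pvPrefB l i * pvPowB w) (pvPrefB l i * 31 ^ w) := by
    rw [pvPowB_eq, pvPow_mod]
    exact (pvModEq_emod _).mul_left _
  have h3 : Int.ModEq pvM (pvPrefB l (i + w) - pvPrefB l i * pvPowB w)
      (pvRaw 0 ((l.drop i).take w)) := by
    have := h2.sub hpow
    have heq : pvPrefB l i * 31 ^ w + pvRaw 0 ((l.drop i).take w) - pvPrefB l i * 31 ^ w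
        = pvRaw 0 ((l.drop i).take w) := by ring
    exact heq ▸ this
  have h4 : pvWH l i w % pvM = pvRaw 0 ((l.drop i).take w) % pvM := pvPoly_modeq _ 0
  have h5 : pvWH l i w % pvM = pvWH l i w := pvPoly_reduced _ 0 hne
  rw [Int.ModEq] at h3
  rw [h3, ← h4, h5]

-- ===== A-side: the rolling loop finds the FIRST index whose hash was seen earlier =====
lemma pvLoopA_LD (l : List Char) (w : Nat) (hw : 1 ≤ w) :
    ∀ (cnt i : Nat) (seen : PySem.Set Int), 1 ≤ i → i + cnt + w ≤ l.length + 1 →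
    (∀ x : Int, x ∈ seen ↔ ∃ j < i, pvWH l j w = x) →
    pvLoopA l w (List.range' i cnt) (pvWH l (i - 1) w) seen
      = (pvLDF (fun k => pvWH l k w) (List.range' i cnt)).map
          (fun k => String.ofList ((l.drop k).take w)) := by
  intro cnt
  induction cnt with
  | zero => intro i seen _ _ _; rfl
  | succ cnt ih =>
    intro i seen hi hn hinv
    rw [List.range'_succ]
    show pvLoopA l w (i :: List.range' (i + 1) cnt) (pvWH l (i - 1) w) seen = _
    have hroll := pvRoll l i w hi hw (by omega)
    have hcond : PySem.Set.contains seen (pvWH l i w) = pvDupF (fun k => pvWH l k w) i := by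
      rw [Bool.eq_iff_iff, PySem.Set.contains_iff, hinv]
      simp [pvDupF, List.any_eq_true]
    simp only [pvLoopA, pvLDF, hroll, hcond]
    split
    · rfl
    · have hinv' : ∀ x : Int, x ∈ PySem.Set.add seen (pvWH l i w) ↔ ∃ j < i + 1, pvWH l j w = x := by
        intro x
        rw [PySem.Set.mem_add, hinv]
        constructor
        · rintro (⟨j, hj, hx⟩ | rfl)
          · exact ⟨j, by omega, hx⟩
          · exact ⟨i, by omega, rfl⟩
        · rintro ⟨j, hj, hx⟩
          by_cases hji : j = i
          · subst hji; exact Or.inr hx.symm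
          · exact Or.inl ⟨j, by omega, hx⟩
      have := ih (i + 1) (PySem.Set.add seen (pvWH l i w)) (by omega) (by omega) hinv'
      simpa using this

lemma pvDetectA_LD (l : List Char) (w : Nat) (hw : 1 ≤ w) (hn : w ≤ l.length) :
    pvDetectA l l.length w
      = (pvLDF (fun k => pvWH l k w) (List.range' 1 (l.length - w))).map
          (fun k => String.ofList ((l.drop k).take w)) := by
  have hh0 : (List.range w).foldl (fun h i => (h * 31 + pvCode l i) % pvM) 0 = pvWH l 0 w := by
    rw [pvFoldRange l w 0 hn]; simp [pvWH]
  show pvLoopA l w (List.range' 1 (l.length - w)) _ _ = _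
  rw [hh0]
  have hinv : ∀ x : Int, x ∈ PySem.Set.add PySem.Set.empty (pvWH l 0 w) ↔ ∃ j < 1, pvWH l j w = x := by
    intro x
    rw [PySem.Set.mem_add]
    constructor
    · rintro (h | rfl)
      · simp [PySem.Set.empty] at h
      · exact ⟨0, by omega, rfl⟩
    · rintro ⟨j, hj, hx⟩
      have : j = 0 := by omega
      subst this; exact Or.inr hx.symm
  have := pvLoopA_LD l w hw (l.length - w) 1 (PySem.Set.add PySem.Set.empty (pvWH l 0 w))
    (by omega) (by omega) hinv
  simpa using this

-- ===== B-side: the group of a hash value is the filtered index range =====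
def pvGrp (f : Nat → Int) (m : Nat) (h : Int) : List Nat :=
  (List.range m).filter (fun i => f i == h)

lemma pvGroupsB_getD (l : List Char) (w m : Nat) (h : Int) :
    (pvGroupsB l w m).getD h [] = pvGrp (pvHashB l w) m h := by
  show ((List.range m).foldl (fun d i => d.modify (pvHashB l w i) [] (· ++ [i])) PySem.Dict.empty).getD h [] = _
  have hmap : (List.range m).foldl (fun d i => d.modify (pvHashB l w i) [] (· ++ [i])) PySem.Dict.empty
      = (((List.range m).map (fun i => (pvHashB l w i, i))).foldl
          (fun d p => d.modify p.1 [] (· ++ [p.2])) PySem.Dict.empty) := by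
    rw [List.foldl_map]
  rw [hmap, PySem.Dict.getD_foldl_modify_append]
  simp [pvGrp, List.filter_map, List.map_map, Function.comp_def]

lemma pvGroupsB_keys (l : List Char) (w m : Nat) :
    (pvGroupsB l w m).keys = PySem.Set.ofList ((List.range m).map (pvHashB l w)) := by
  show ((List.range m).foldl (fun d i => d.modify (pvHashB l w i) [] (· ++ [i])) PySem.Dict.empty).keys = _
  rw [PySem.Dict.keys_foldl_modify_key]
  exact PySem.Set.update_nil_left _

-- groups are strictly increasing index lists
lemma pvGrp_pairwise (f : Nat → Int) (m : Nat) (h : Int) : (pvGrp f m h).Pairwise (· < ·) :=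
  (List.pairwise_lt_range).filter _

lemma pvGrp_mem (f : Nat → Int) (m : Nat) (h : Int) (i : Nat) :
    i ∈ pvGrp f m h ↔ i < m ∧ f i = h := by
  simp [pvGrp, List.mem_filter, List.mem_range]

-- in a strictly increasing list, any element with a smaller companion bounds the second entry
lemma pvSecond_le (g : List Nat) (hp : g.Pairwise (· < ·)) {a b : Nat}
    (ha : a ∈ g) (hb : b ∈ g) (hab : a < b) : ∃ c, g[1]? = some c ∧ c ≤ b := by
  match g, hp, ha, hb with
  | [], _, ha, _ => exact absurd ha (by simp)
  | [x], _, ha, hb =>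
    rw [List.mem_singleton] at ha hb
    omega
  | x :: y :: t, hp, ha, hb =>
    refine ⟨y, rfl, ?_⟩
    rcases List.pairwise_cons.mp hp with ⟨hx, hyt⟩
    rcases List.pairwise_cons.mp hyt with ⟨hy, _⟩
    rcases List.mem_cons.mp hb with rfl | hb'
    · -- b = x: a ∈ g with a < x is impossible
      rcases List.mem_cons.mp ha with rfl | ha'
      · omega
      · have := hx a ha'; omega
    · rcases List.mem_cons.mp hb' with rfl | hb''
      · omega
      · have := hy b hb''; omega

-- every candidate (a group's second entry) is a duplicated index
lemma pvCand_dup (f : Nat → Int) (m : Nat) (h : Int) (c : Nat)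
    (hc : (pvGrp f m h)[1]? = some c) :
    pvDupF f c = true ∧ 1 ≤ c ∧ c < m := by
  have hlen : 1 < (pvGrp f m h).length := (List.getElem?_eq_some_iff.mp hc).1
  have h0 : (pvGrp f m h)[0] ∈ pvGrp f m h := List.getElem_mem _
  have hc1 : (pvGrp f m h)[1] = c := by
    have := List.getElem?_eq_getElem (l := pvGrp f m h) (i := 1) hlen
    rw [this] at hc; exact Option.some.inj hc
  have h1 : c ∈ pvGrp f m h := hc1 ▸ List.getElem_mem _
  have hlt : (pvGrp f m h)[0] < c := by
    have := (List.pairwise_iff_getElem.mp (pvGrp_pairwise f m h)) 0 1 (by omega) hlen (by omega)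
    omega
  rcases (pvGrp_mem f m h _).mp h0 with ⟨h0m, h0f⟩
  rcases (pvGrp_mem f m h _).mp h1 with ⟨h1m, h1f⟩
  refine ⟨?_, by omega, h1m⟩
  simp only [pvDupF, List.any_eq_true, List.mem_range]
  exact ⟨(pvGrp f m h)[0], hlt, by rw [h0f, h1f]; simp⟩

-- conversely, every duplicated index is bounded below by some candidate
lemma pvDup_cand (f : Nat → Int) (m : Nat) (i : Nat) (him : i < m)
    (hd : pvDupF f i = true) :
    ∃ c, (pvGrp f m (f i))[1]? = some c ∧ c ≤ i := by
  simp only [pvDupF, List.any_eq_true, List.mem_range] at hd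
  rcases hd with ⟨j, hji, hf⟩
  have hj : j ∈ pvGrp f m (f i) := (pvGrp_mem f m (f i) j).mpr ⟨by omega, by exact beq_iff_eq.mp hf⟩
  have hi : i ∈ pvGrp f m (f i) := (pvGrp_mem f m (f i) i).mpr ⟨him, rfl⟩
  exact pvSecond_le _ (pvGrp_pairwise f m (f i)) hj hi hji

-- cands membership characterization
lemma pvCands_mem (l : List Char) (w m : Nat) (c : Nat) :
    (c ∈ (PySem.Dict.values (pvGroupsB l w m)).filterMap (fun g => if 1 < g.length then g[1]? else none))
      ↔ ∃ h, (∃ i < m, pvHashB l w i = h) ∧ (pvGrp (pvHashB l w) m h)[1]? = some c := by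
  have hnd : (pvGroupsB l w m).keys.Nodup := by
    rw [pvGroupsB_keys]; exact PySem.Set.nodup_ofList _
  rw [PySem.Dict.values_eq_map_keys (pvGroupsB l w m) hnd [], List.filterMap_map, List.mem_filterMap]
  constructor
  · rintro ⟨h, hk, hq⟩
    rw [pvGroupsB_keys, PySem.Set.mem_ofList, List.mem_map] at hk
    rcases hk with ⟨i, hi, rfl⟩
    rw [List.mem_range] at hi
    refine ⟨pvHashB l w i, ⟨i, hi, rfl⟩, ?_⟩
    simp only [Function.comp, pvGroupsB_getD] at hq
    split at hq
    · exact hq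
    · exact absurd hq (by simp)
  · rintro ⟨h, ⟨i, hi, rfl⟩, hq⟩
    refine ⟨pvHashB l w i, ?_, ?_⟩
    · rw [pvGroupsB_keys, PySem.Set.mem_ofList, List.mem_map]
      exact ⟨i, List.mem_range.mpr hi, rfl⟩
    · simp only [Function.comp, pvGroupsB_getD]
      have : 1 < (pvGrp (pvHashB l w) m (pvHashB l w i)).length := (List.getElem?_eq_some_iff.mp hq).1
      rw [if_pos this]; exact hq

-- characterization of the reference scan over a contiguous range
lemma pvLDF_some (f : Nat → Int) :
    ∀ (cnt a i : Nat), pvLDF f (List.range' a cnt) = some i →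
      a ≤ i ∧ i < a + cnt ∧ pvDupF f i = true ∧ ∀ j, a ≤ j → j < i → pvDupF f j = false := by
  intro cnt
  induction cnt with
  | zero => intro a i h; exact absurd h (by simp [pvLDF])
  | succ cnt ih =>
    intro a i h
    rw [List.range'_succ] at h
    simp only [pvLDF] at h
    split at h
    · rename_i hd
      cases h
      exact ⟨le_refl _, by omega, hd, fun j h1 h2 => by omega⟩
    · rename_i hd
      rcases ih (a + 1) i h with ⟨h1, h2, h3, h4⟩
      refine ⟨by omega, by omega, h3, fun j hj1 hj2 => ?_⟩
      by_cases hja : j = a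
      · subst hja; exact Bool.not_eq_true _ ▸ (by simpa using hd)
      · exact h4 j (by omega) hj2

lemma pvLDF_none (f : Nat → Int) :
    ∀ (cnt a : Nat), pvLDF f (List.range' a cnt) = none →
      ∀ j, a ≤ j → j < a + cnt → pvDupF f j = false := by
  intro cnt
  induction cnt with
  | zero => intro a _ j h1 h2; omega
  | succ cnt ih =>
    intro a h j h1 h2
    rw [List.range'_succ] at h
    simp only [pvLDF] at h
    split at h
    · exact absurd h (by simp)
    · rename_i hd
      by_cases hja : j = a
      · subst hja; simpa using hd
      · exact ih (a + 1) h j (by omega) (by omega)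

-- B's detect equals the reference scan (indices 1..m-1; index 0 is never a duplicate)
lemma pvEarliestB_LD (l : List Char) (w m : Nat) :
    pvEarliestB l w m = pvLDF (pvHashB l w) (List.range' 1 (m - 1)) := by
  show PySem.List.min? ((PySem.Dict.values (pvGroupsB l w m)).filterMap
      (fun g => if 1 < g.length then g[1]? else none)) (fun x => x) = _
  set cands := (PySem.Dict.values (pvGroupsB l w m)).filterMap
      (fun g => if 1 < g.length then g[1]? else none) with hcands
  cases hLD : pvLDF (pvHashB l w) (List.range' 1 (m - 1)) with
  | none =>
    rw [PySem.List.min?_eq_none_iff]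
    by_contra hne
    rcases List.exists_mem_of_ne_nil _ hne with ⟨c, hc⟩
    rcases (pvCands_mem l w m c).mp hc with ⟨h, _, hq⟩
    rcases pvCand_dup (pvHashB l w) m h c hq with ⟨hd, hc1, hcm⟩
    have := pvLDF_none (pvHashB l w) (m - 1) 1 hLD c hc1 (by omega)
    rw [hd] at this; exact absurd this (by simp)
  | some i0 =>
    rcases pvLDF_some (pvHashB l w) (m - 1) 1 i0 hLD with ⟨h1, h2, h3, h4⟩
    have hi0m : i0 < m := by omega
    rcases pvDup_cand (pvHashB l w) m i0 hi0m h3 with ⟨c, hq, hci⟩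
    have hcc : c ∈ cands :=
      (pvCands_mem l w m c).mpr ⟨pvHashB l w i0, ⟨i0, hi0m, rfl⟩, hq⟩
    have hne : cands ≠ [] := List.ne_nil_of_mem hcc
    cases hmin : PySem.List.min? cands (fun x => x) with
    | none => exact absurd ((PySem.List.min?_eq_none_iff cands _).mp hmin) hne
    | some v =>
      have hv : v ∈ cands := PySem.List.min?_mem hmin
      rcases (pvCands_mem l w m v).mp hv with ⟨h', _, hq'⟩
      rcases pvCand_dup (pvHashB l w) m h' v hq' with ⟨hvd, hv1, hvm⟩
      have hvle : v ≤ c := PySem.List.min?_isMin hmin c hcc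
      have hge : i0 ≤ v := by
        by_contra hlt
        have := h4 v hv1 (by omega)
        rw [hvd] at this; exact absurd this (by simp)
      have : v = i0 := by omega
      rw [this]

-- pvLDF only looks at indices < m, where pvHashB is the true window hash
lemma pvDupF_congr (f g : Nat → Int) (m i : Nat) (him : i < m)
    (hfg : ∀ k, k < m → f k = g k) : pvDupF f i = pvDupF g i := by
  simp only [pvDupF]
  apply PySem.List.any_congr_mem
  intro j hj
  rw [List.mem_range] at hj
  rw [hfg j (by omega), hfg i him]

lemma pvLDF_congr (f g : Nat → Int) (m : Nat) (hfg : ∀ k, k < m → f k = g k) :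
    ∀ (cnt a : Nat), a + cnt ≤ m →
    pvLDF f (List.range' a cnt) = pvLDF g (List.range' a cnt) := by
  intro cnt
  induction cnt with
  | zero => intro a _; rfl
  | succ cnt ih =>
    intro a hle
    rw [List.range'_succ]
    simp only [pvLDF]
    rw [pvDupF_congr f g m a (by omega) hfg]
    split
    · rfl
    · exact ih (a + 1) (by omega)

-- the two detects agree for every probed window size
lemma pvDetect_eq (l : List Char) (w : Nat) (hw : 1 ≤ w) (hn : w ≤ l.length) :
    pvDetectA l l.length w
      = (pvEarliestB l w (l.length - w + 1)).map (fun k => String.ofList ((l.drop k).take w)) := by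
  rw [pvDetectA_LD l w hw hn, pvEarliestB_LD]
  have hm : l.length - w + 1 - 1 = l.length - w := by omega
  rw [hm]
  have hcongr := pvLDF_congr (fun k => pvWH l k w) (pvHashB l w) (l.length - w + 1)
    (fun k hk => (pvClosed l k w hw (by omega)).symm) (l.length - w) 1 (by omega)
  rw [← hcongr]

-- binary searches agree
lemma pvBsearch_eq (l : List Char) :
    ∀ (k : Nat) (lo hi : Int) (best : String), (hi + 1 - lo).toNat ≤ k → 1 ≤ lo → hi ≤ (l.length : Int) - 1 →
    pvBsearchA l l.length lo hi best = pvSearchB l l.length lo hi best := by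
  intro k
  induction k with
  | zero =>
    intro lo hi best hk hlo hhi
    have : ¬ lo ≤ hi := by omega
    rw [pvBsearchA, pvSearchB]
    simp [this]
  | succ k ih =>
    intro lo hi best hk hlo hhi
    by_cases hle : lo ≤ hi
    · rw [pvBsearchA, pvSearchB]
      simp only [hle, dite_true]
      have hmid : PySem.Int.floordiv (lo + hi) 2 = (lo + hi) / 2 :=
        PySem.Int.floordiv_eq_ediv_of_pos (by omega)
      have hb1 : lo ≤ PySem.Int.floordiv (lo + hi) 2 := by rw [hmid]; omega
      have hb2 : PySem.Int.floordiv (lo + hi) 2 ≤ hi := by rw [hmid]; omega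
      have hw1 : 1 ≤ (PySem.Int.floordiv (lo + hi) 2).toNat := by omega
      have hw2 : (PySem.Int.floordiv (lo + hi) 2).toNat ≤ l.length := by omega
      rw [pvDetect_eq l (PySem.Int.floordiv (lo + hi) 2).toNat hw1 hw2]
      cases pvEarliestB l (PySem.Int.floordiv (lo + hi) 2).toNat
          (l.length - (PySem.Int.floordiv (lo + hi) 2).toNat + 1) with
      | some i =>
        exact ih (PySem.Int.floordiv (lo + hi) 2 + 1) hi _ (by omega) (by omega) hhi
      | none => exact ih lo (PySem.Int.floordiv (lo + hi) 2 - 1) best (by omega) hlo (by omega)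
    · rw [pvBsearchA, pvSearchB]
      simp [hle]

-- ===== VERDICT (by name: the statement is the Claim_ definition above) =====
theorem find_longest_duplicate_spec : Claim_equal_find_longest_duplicate := by
  intro s _
  unfold Spec_find_longest_duplicate find_longest_duplicate find_longest_duplicate_alt
  exact pvBsearch_eq s.toList ((((s.toList.length : Int) - 1) + 1 - 1).toNat) 1 ((s.toList.length : Int) - 1) "" (by omega) (by omega) (by omega)
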